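-- pv_equiv track=rewrite | github.com/bonham79/NeMo | nemo/collections/nlp/data/dialogue/dataset/dialogue_bert_dataset.py | get_bio_slot_label_from_sequence
-- ===== SOURCE A (Python) =====
-- def get_bio_slot_label_from_sequence(slot_label_list, label_id_for_empty_slot):
--     """
--     Generate BIO slot label based on slot label
--     Args:
--         slot_label_list: list of int representing slot class of each word token (per sentence)
--         Eg,
--         send me a  wake up alert at seven am tomorrow morning PAD
--         54   54 54 0    0  54    54 46    46 12       48      -1
--         [54, 54, 54, 0, 0, 54, 54, 46, 46, 12, 48, -1]
--
--         label_id_for_empty_slot: int lable of "Other" type in the slot_label_list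
--         For instance, in drive_through dataset "Other" is 0; in assistant dataset "Other" is 54
--     Returns:
--         bio_label_list: list of int representing BIO slot class of each word token
--         eg,
--         send me a  wake up alert at seven am tomorrow morning PAD
--         0    0  0  1    2  0     0  1     2  1        1       0
--         [0, 0, 0, 1, 2, 0, 0, 1, 2, 1, 1, 0]
--     """
--     bio_label_list = []
--     for idx, slot_label in enumerate(slot_label_list):
--         if slot_label in [label_id_for_empty_slot, -1]:
--             bio_label_list.append(0)
--         elif idx > 0 and slot_label == slot_label_list[idx-1]:
--             bio_label_list.append(2)
--         else:
--             bio_label_list.append(1)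
--
--     return bio_label_list
-- ===== SOURCE B (Python) =====
-- def get_bio_slot_label_from_sequence(slot_label_list, label_id_for_empty_slot):
--     # Run-based decomposition: scan maximal runs of equal labels and emit each
--     # whole run's BIO codes at once.
--     bio_label_list = []
--     n = len(slot_label_list)
--     i = 0
--     while i < n:
--         key = slot_label_list[i]
--         j = i + 1
--         while j < n and slot_label_list[j] == key:
--             j += 1
--         if key == label_id_for_empty_slot or key == -1:
--             bio_label_list.extend([0] * (j - i))
--         else:
--             bio_label_list.append(1)
--             bio_label_list.extend([2] * (j - i - 1))
--         i = j
--     return bio_label_list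
-- ===== Notes on version B (the rewrite author's own statement) =====
-- stated objective: alternative
-- what changed: Replaces A's per-element loop that compares each label to its predecessor by index with a run-peeling recursion: split off the maximal run of the leading label and emit the whole run's BIO codes ([0]*n or [1]+[2]*(n-1)) at once.
import Mathlib
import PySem

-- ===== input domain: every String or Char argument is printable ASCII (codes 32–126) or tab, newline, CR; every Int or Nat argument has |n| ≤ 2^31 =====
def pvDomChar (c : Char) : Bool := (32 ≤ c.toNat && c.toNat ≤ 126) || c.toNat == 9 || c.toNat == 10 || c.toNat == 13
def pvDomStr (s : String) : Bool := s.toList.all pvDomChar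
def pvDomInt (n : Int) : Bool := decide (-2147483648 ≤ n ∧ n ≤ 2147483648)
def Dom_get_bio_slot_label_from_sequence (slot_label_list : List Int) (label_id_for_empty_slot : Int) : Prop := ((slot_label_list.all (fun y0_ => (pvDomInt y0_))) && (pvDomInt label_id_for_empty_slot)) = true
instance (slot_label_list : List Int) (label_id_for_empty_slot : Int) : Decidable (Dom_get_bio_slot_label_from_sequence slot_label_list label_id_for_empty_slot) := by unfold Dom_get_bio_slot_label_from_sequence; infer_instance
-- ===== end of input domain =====

-- B replaces A's per-element predecessor comparison by peeling maximal runs of equal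
-- labels and emitting each run's BIO codes at once (alternative decomposition, same cost).

-- ===== PORT A =====
-- bio_label_list = []; for idx, slot_label in enumerate(...): ... ; return bio_label_list
def get_bio_slot_label_from_sequence (slot_label_list : List Int) (label_id_for_empty_slot : Int) : List Int :=
  (PySem.List.enumerate slot_label_list).foldl
    (fun bio_label_list p =>
      if p.2 = label_id_for_empty_slot ∨ p.2 = -1 then
        bio_label_list ++ [0]
      else if p.1 > 0 ∧ PySem.List.pyGet? slot_label_list (p.1 - 1) = some p.2 then
        bio_label_list ++ [2]
      else
        bio_label_list ++ [1]) []

-- ===== PORT B =====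
-- inner while loop 'while j < n and xs[j] == key: j += 1'
def pvRunEnd (xs : List Int) (key : Int) (j : Nat) : Nat :=
  if h : j < xs.length then
    if xs[j] = key then pvRunEnd xs key (j + 1) else j
  else j
termination_by xs.length - j

-- needed for the outer loop's termination, cited in decreasing_by
theorem pvRunEnd_ge (xs : List Int) (key : Int) (j : Nat) : j ≤ pvRunEnd xs key j := by
  rw [pvRunEnd]
  split
  · split
    · exact le_trans (Nat.le_succ j) (pvRunEnd_ge xs key (j + 1))
    · exact le_refl j
  · exact le_refl j
termination_by xs.length - j

-- outer while loop over run starts, accumulating bio_label_list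
def pvAltGo (xs : List Int) (e : Int) (i : Nat) (bio : List Int) : List Int :=
  if h : i < xs.length then
    let key := xs[i]
    let j := pvRunEnd xs key (i + 1)
    pvAltGo xs e j
      (bio ++ (if key = e ∨ key = -1 then List.replicate (j - i) 0
               else 1 :: List.replicate (j - i - 1) 2))
  else bio
termination_by xs.length - i
decreasing_by
  have := pvRunEnd_ge xs xs[i] (i + 1)
  omega

def get_bio_slot_label_from_sequence_alt (slot_label_list : List Int) (label_id_for_empty_slot : Int) : List Int :=
  pvAltGo slot_label_list label_id_for_empty_slot 0 []

-- ===== PRECONDITION & SPEC =====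
def Spec_get_bio_slot_label_from_sequence (slot_label_list : List Int) (label_id_for_empty_slot : Int) (out : List Int) : Prop := out = get_bio_slot_label_from_sequence_alt slot_label_list label_id_for_empty_slot
instance (slot_label_list : List Int) (label_id_for_empty_slot : Int) (out : List Int) : Decidable (Spec_get_bio_slot_label_from_sequence slot_label_list label_id_for_empty_slot out) := by unfold Spec_get_bio_slot_label_from_sequence; infer_instance

-- ===== CLAIM (what is proved, stated in full; the proofs are below) =====
def Claim_equal_get_bio_slot_label_from_sequence : Prop := ∀ (slot_label_list : List Int) (label_id_for_empty_slot : Int), Dom_get_bio_slot_label_from_sequence slot_label_list label_id_for_empty_slot → Spec_get_bio_slot_label_from_sequence slot_label_list label_id_for_empty_slot (get_bio_slot_label_from_sequence slot_label_list label_id_for_empty_slot)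

-- ===== LEMMAS AND PROOFS =====

-- ===== VERDICT (by name: the statement is the Claim_ definition above) =====



-- canonical single-pass recursion carrying the previous label; both ports are proved equal to it
def pvBio (prev : Option Int) (xs : List Int) (e : Int) : List Int :=
  match xs with
  | [] => []
  | x :: t =>
    (if x = e ∨ x = -1 then 0 else if prev = some x then 2 else 1) :: pvBio (some x) t e

theorem pvBio_irrel (k : Int) (xs : List Int) (e : Int)
    (h : ∀ y, xs.head? = some y → y ≠ k) : pvBio (some k) xs e = pvBio none xs e := by
  cases xs with
  | nil => rfl
  | cons x t =>
    have hx : x ≠ k := h x rfl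
    have hk : ¬ (k = x) := fun hk => hx hk.symm
    simp [pvBio, hk]

theorem pvBio_run (k : Int) (t : List Int) (e : Int) :
    pvBio (some k) t e =
      (t.takeWhile (fun x => x = k)).map (fun _ => if k = e ∨ k = -1 then (0:Int) else 2)
      ++ pvBio none (t.drop (t.takeWhile (fun x => x = k)).length) e := by
  induction t with
  | nil => rfl
  | cons x t ih =>
    by_cases hx : x = k
    · subst hx
      simp [List.takeWhile, pvBio, ih]
    · have ht : (x :: t).takeWhile (fun y => decide (y = k)) = [] := by
        simp [List.takeWhile, hx]
      rw [ht]
      simpa using pvBio_irrel k (x :: t) e (by intro y hy; simp at hy; omega)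

theorem pvPrev_iff (pre suf : List Int) (x : Int) (xs : List Int)
    (hxs : xs = pre ++ x :: suf) :
    (((pre.length : Int) > 0 ∧ PySem.List.pyGet? xs ((pre.length : Int) - 1) = some x) ↔
      pre.getLast? = some x) := by
  cases pre with
  | nil => simp
  | cons a pre' =>
    have h1 : (((a :: pre').length : Int) - 1) = (((a :: pre').length - 1 : Nat) : Int) := by
      simp
    constructor
    · rintro ⟨-, hget⟩
      rw [h1, PySem.List.pyGet?_natCast, hxs] at hget
      rw [List.getElem?_append_left (by simp)] at hget
      rw [List.getLast?_eq_getElem?]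
      exact hget
    · intro hlast
      refine ⟨by simp, ?_⟩
      rw [h1, PySem.List.pyGet?_natCast, hxs,
        List.getElem?_append_left (by simp)]
      rw [List.getLast?_eq_getElem?] at hlast
      exact hlast

theorem portA_gen (e : Int) (xs : List Int) (suf : List Int) :
    ∀ (pre acc : List Int), xs = pre ++ suf →
    (PySem.List.enumerate suf (pre.length : Int)).foldl
      (fun bio_label_list p =>
        if p.2 = e ∨ p.2 = -1 then bio_label_list ++ [0]
        else if p.1 > 0 ∧ PySem.List.pyGet? xs (p.1 - 1) = some p.2 then bio_label_list ++ [2]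
        else bio_label_list ++ [1]) acc
    = acc ++ pvBio pre.getLast? suf e := by
  induction suf with
  | nil => intro pre acc _; simp [PySem.List.enumerate_nil, pvBio]
  | cons x suf ih =>
    intro pre acc hxs
    rw [PySem.List.enumerate_cons, List.foldl_cons]
    have hcast : ((pre.length : Int) + 1) = (((pre ++ [x]).length : Nat) : Int) := by
      simp
    have hrec := ih (pre ++ [x]) (acc ++
      [if x = e ∨ x = -1 then 0
       else if pre.getLast? = some x then 2 else 1]) (by simp [hxs])
    rw [hcast]
    have hhead : (if x = e ∨ x = -1 then acc ++ [0]
        else if (pre.length : Int) > 0 ∧ PySem.List.pyGet? xs ((pre.length : Int) - 1) = some x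
          then acc ++ [2] else acc ++ [1])
        = acc ++ [if x = e ∨ x = -1 then 0
            else if pre.getLast? = some x then 2 else 1] := by
      by_cases h1 : x = e ∨ x = -1
      · simp [h1]
      · rw [if_neg h1, if_neg h1]
        by_cases h2 : pre.getLast? = some x
        · rw [if_pos ((pvPrev_iff pre suf x xs hxs).mpr h2), if_pos h2]
        · rw [if_neg (fun hc => h2 ((pvPrev_iff pre suf x xs hxs).mp hc)), if_neg h2]
    simp only at hhead ⊢
    rw [hhead, hrec]
    simp [pvBio]

theorem portA_eq_pvBio (xs : List Int) (e : Int) :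
    get_bio_slot_label_from_sequence xs e = pvBio none xs e := by
  have := portA_gen e xs xs [] [] (by simp)
  simpa [get_bio_slot_label_from_sequence] using this

theorem pvRunEnd_char (xs : List Int) (key : Int) (j : Nat) (hj : j ≤ xs.length) :
    pvRunEnd xs key j = j + ((xs.drop j).takeWhile (fun x => x = key)).length := by
  rw [pvRunEnd]
  split
  · rename_i h
    rw [List.drop_eq_getElem_cons h]
    split
    · rename_i hk
      rw [pvRunEnd_char xs key (j + 1) h]
      simp [List.takeWhile, hk]
      omega
    · rename_i hk
      simp [List.takeWhile, hk]
  · rename_i h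
    have : xs.drop j = [] := List.drop_eq_nil_of_le (by omega)
    simp [this]
termination_by xs.length - j

theorem pvAltGo_eq_pvBio (xs : List Int) (e : Int) (i : Nat) (bio : List Int)
    (hi : i ≤ xs.length) :
    pvAltGo xs e i bio = bio ++ pvBio none (xs.drop i) e := by
  rw [pvAltGo]
  split
  · rename_i h
    have hdrop : xs.drop i = xs[i] :: xs.drop (i + 1) := List.drop_eq_getElem_cons h
    set key := xs[i] with hkey
    set t := xs.drop (i + 1) with ht
    have hchar : pvRunEnd xs key (i + 1) = (i + 1) + (t.takeWhile (fun x => x = key)).length := by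
      rw [pvRunEnd_char xs key (i + 1) (by omega), ht]
    set r := t.takeWhile (fun x => x = key) with hr
    have hlen : r.length ≤ t.length := List.Sublist.length_le (List.takeWhile_sublist _)
    have htlen : t.length = xs.length - (i + 1) := by rw [ht]; simp
    have hj : pvRunEnd xs key (i + 1) ≤ xs.length := by omega
    rw [pvAltGo_eq_pvBio xs e (pvRunEnd xs key (i + 1)) _ hj]
    have hdrop2 : xs.drop (pvRunEnd xs key (i + 1)) = t.drop r.length := by
      rw [hchar, List.drop_drop]
    rw [hdrop2, hdrop]
    rw [show pvBio none (key :: t) e =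
        (if key = e ∨ key = -1 then 0 else 1) :: pvBio (some key) t e from by simp [pvBio]]
    rw [pvBio_run key t e, ← hr]
    have hsub1 : pvRunEnd xs key (i + 1) - i = r.length + 1 := by omega
    have hsub2 : pvRunEnd xs key (i + 1) - i - 1 = r.length := by omega
    rw [hsub1]
    simp only [Nat.add_sub_cancel]
    by_cases hke : key = e ∨ key = -1 <;>
      simp [hke, List.replicate_succ, List.map_const']
  · rename_i h
    have : xs.drop i = [] := List.drop_eq_nil_of_le (by omega)
    simp [this, pvBio]
termination_by xs.length - i
decreasing_by
  have := pvRunEnd_ge xs xs[i] (i + 1)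
  omega

theorem portB_eq_pvBio (xs : List Int) (e : Int) :
    get_bio_slot_label_from_sequence_alt xs e = pvBio none xs e := by
  rw [get_bio_slot_label_from_sequence_alt, pvAltGo_eq_pvBio xs e 0 [] (by omega)]
  simp

theorem get_bio_slot_label_from_sequence_spec : Claim_equal_get_bio_slot_label_from_sequence := by
  intro xs e _
  unfold Spec_get_bio_slot_label_from_sequence
  rw [portA_eq_pvBio, portB_eq_pvBio]
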